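-- pv_equiv track=rewrite | github.com/mailong25/bert-vietnamese-question-answering | relevance_ranking.py | generateNgram
-- ===== SOURCE A (Python) =====
-- def generateNgram(paper, ngram = 2, deli = '_', rmSet = {}):
--     words = paper.split()
--     if len(words) == 1:
--         return ''
--
--     ngrams = []
--     for i in range(0,len(words) - ngram + 1):
--         block = words[i:i + ngram]
--         if not any(w in rmSet for w in block):
--             ngrams.append(deli.join(block))
--
--     return ngrams
-- ===== SOURCE B (Python) =====
-- def generateNgram(paper, ngram = 2, deli = '_', rmSet = {}):
--     words = paper.split()
--     if len(words) == 1: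
--         return ''
--
--     # partition into maximal runs of consecutive words not in rmSet
--     runs = []
--     cur = []
--     for w in words:
--         if w in rmSet:
--             if cur:
--                 runs.append(cur)
--             cur = []
--         else:
--             cur.append(w)
--     if cur:
--         runs.append(cur)
--
--     ngrams = []
--     for run in runs:
--         for i in range(len(run) - ngram + 1):
--             ngrams.append(deli.join(run[i:i + ngram]))
--     return ngrams
-- ===== Notes on version B (the rewrite author's own statement) =====
-- stated objective: alternative
-- what changed: Instead of sliding every window and rejecting those containing a removed word with any(), B first partitions the words in one scan into maximal runs of consecutive non-removed words and then emits the contiguous n-grams of each run, so no per-window membership scan over the removed set remains.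
-- outside the precondition, e.g. on generateNgram('hi', 2, '_', set()): A returns '', B returns ''; on generateNgram('a b c', -1, '_', {'b'}): A returns ['', '', '', ''], B returns ['', '', '', '', '', '']
import Mathlib
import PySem

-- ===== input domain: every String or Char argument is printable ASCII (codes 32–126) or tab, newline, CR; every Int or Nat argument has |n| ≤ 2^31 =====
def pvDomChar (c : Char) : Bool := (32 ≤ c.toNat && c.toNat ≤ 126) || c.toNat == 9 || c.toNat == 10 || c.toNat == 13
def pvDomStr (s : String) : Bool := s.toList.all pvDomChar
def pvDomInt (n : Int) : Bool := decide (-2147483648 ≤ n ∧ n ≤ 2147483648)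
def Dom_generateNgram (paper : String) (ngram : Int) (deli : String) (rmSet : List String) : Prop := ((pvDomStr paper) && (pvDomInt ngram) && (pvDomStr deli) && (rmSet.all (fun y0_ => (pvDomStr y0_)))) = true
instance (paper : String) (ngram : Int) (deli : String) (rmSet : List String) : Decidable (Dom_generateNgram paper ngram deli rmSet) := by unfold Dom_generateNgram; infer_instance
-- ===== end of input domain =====

-- B partitions the words into maximal runs of non-removed words and emits each run's
-- contiguous n-grams, instead of testing every sliding window against the removed set.


-- ===== PORT A =====
-- Python A returns the scalar '' when len(words) == 1 (not a list); that input is outside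
-- Pre_ below, and the port returns [] there.
def generateNgram (paper : String) (ngram : Int) (deli : String) (rmSet : List String) : List String :=
  let words := PySem.Str.split₀ paper
  if words.length == 1 then []
  else
    (PySem.List.pyRange 0 ((words.length : Int) - ngram + 1) 1).foldl
      (fun ngrams i =>
        let block := PySem.List.slice words (some i) (some (i + ngram))
        if block.any (fun w => PySem.Set.contains rmSet w) then ngrams
        else ngrams ++ [PySem.Str.join deli block]) []

-- ===== PORT B =====
def generateNgram_alt (paper : String) (ngram : Int) (deli : String) (rmSet : List String) : List String :=
  let words := PySem.Str.split₀ paper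
  if words.length == 1 then []
  else
    let st := words.foldl
      (fun (st : List (List String) × List String) w =>
        if PySem.Set.contains rmSet w then
          (if st.2 ≠ [] then st.1 ++ [st.2] else st.1, [])
        else (st.1, st.2 ++ [w])) ([], [])
    let runs := if st.2 ≠ [] then st.1 ++ [st.2] else st.1
    runs.foldl
      (fun ngrams run =>
        (PySem.List.pyRange 0 ((run.length : Int) - ngram + 1) 1).foldl
          (fun ngrams i =>
            ngrams ++ [PySem.Str.join deli (PySem.List.slice run (some i) (some (i + ngram)))])
          ngrams) []

-- ===== PRECONDITION & SPEC =====
-- Pre_ excludes (a) single-word papers, where Python A returns the scalar '' instead of a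
-- list of the declared type, and (b) non-positive ngram, which is outside the task's
-- natural domain (an n-gram size is at least 1); B does not mirror A's degenerate
-- negative-stop windows there.
def Pre_generateNgram (paper : String) (ngram : Int) (deli : String) (rmSet : List String) : Prop :=
  1 ≤ ngram ∧ (PySem.Str.split₀ paper).length ≠ 1
instance (paper : String) (ngram : Int) (deli : String) (rmSet : List String) : Decidable (Pre_generateNgram paper ngram deli rmSet) := by unfold Pre_generateNgram; infer_instance

def pvWitness_generateNgram : String × Int × String × List String := ("a b c", 2, "_", ["b"])

def Spec_generateNgram (paper : String) (ngram : Int) (deli : String) (rmSet : List String) (out : List String) : Prop := out = generateNgram_alt paper ngram deli rmSet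
instance (paper : String) (ngram : Int) (deli : String) (rmSet : List String) (out : List String) : Decidable (Spec_generateNgram paper ngram deli rmSet out) := by unfold Spec_generateNgram; infer_instance

-- ===== CLAIM (what is proved, stated in full; the proofs are below) =====
def Claim_equal_generateNgram : Prop := ∀ (paper : String) (ngram : Int) (deli : String) (rmSet : List String), Dom_generateNgram paper ngram deli rmSet → Pre_generateNgram paper ngram deli rmSet → Spec_generateNgram paper ngram deli rmSet (generateNgram paper ngram deli rmSet)

-- ===== LEMMAS AND PROOFS =====
def winsA (rm : List String) (n : Nat) (join1 : List String → String) (ws : List String) : List String :=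
  (((List.range (ws.length + 1 - n)).map (fun k => (ws.drop k).take n)).filter
    (fun b => !b.any (fun w => rm.contains w))).map join1
def segB (n : Nat) (join1 : List String → String) (r : List String) : List String :=
  (List.range (r.length + 1 - n)).map (fun k => join1 ((r.drop k).take n))

lemma winsA_cons_of_any (rm : List String) (n : Nat) (join1 : List String → String)
    (w : String) (ws : List String)
    (hany : ((w :: ws).take n).any (fun x => rm.contains x) = true) :
    winsA rm n join1 (w :: ws) = winsA rm n join1 ws := by
  unfold winsA
  by_cases h : n ≤ ws.length + 1
  · have h2 : (w::ws).length + 1 - n = (ws.length + 1 - n) + 1 := by simp; omega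
    rw [h2, List.range_succ_eq_map]
    simp only [List.map_cons, List.map_map, List.drop_zero, Function.comp_def,
      List.drop_succ_cons, List.filter_cons, hany, Bool.not_true, Bool.false_eq_true,
      if_false]
  · have h2 : ws.length + 1 + 1 - n = 0 := by omega
    have h3 : ws.length + 1 - n = 0 := by omega
    simp [h2, h3]

lemma winsA_cons_of_clean (rm : List String) (n : Nat) (join1 : List String → String)
    (w : String) (ws : List String)
    (hany : ((w :: ws).take n).any (fun x => rm.contains x) = false) :
    winsA rm n join1 (w :: ws) =
      (if n ≤ ws.length + 1 then [join1 ((w :: ws).take n)] else []) ++ winsA rm n join1 ws := by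
  unfold winsA
  by_cases h : n ≤ ws.length + 1
  · have h2 : (w::ws).length + 1 - n = (ws.length + 1 - n) + 1 := by simp; omega
    rw [h2, List.range_succ_eq_map]
    simp only [List.map_cons, List.map_map, List.drop_zero, Function.comp_def,
      List.drop_succ_cons, List.filter_cons, hany, Bool.not_false, if_true, if_pos h]
    simp
  · have h2 : ws.length + 1 + 1 - n = 0 := by omega
    have h3 : ws.length + 1 - n = 0 := by omega
    simp [h2, h3, h]

lemma segB_cons (n : Nat) (join1 : List String → String) (w : String) (ws : List String) :
    segB n join1 (w :: ws) =
      (if n ≤ ws.length + 1 then [join1 ((w :: ws).take n)] else []) ++ segB n join1 ws := by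
  unfold segB
  by_cases h : n ≤ ws.length + 1
  · have h2 : (w::ws).length + 1 - n = (ws.length + 1 - n) + 1 := by simp; omega
    rw [h2, List.range_succ_eq_map]
    simp [h, List.map_map, Function.comp_def]
  · have h2 : ws.length + 1 + 1 - n = 0 := by omega
    have h3 : ws.length + 1 - n = 0 := by omega
    simp [h2, h3, h]


lemma dropWhile_head_false (p : String → Bool) (x : String) (t : List String) :
    ∀ l : List String, l.dropWhile p = x :: t → p x = false := by
  intro l h
  induction l with
  | nil => simp at h
  | cons a l ih =>
    by_cases ha : p a = true
    · rw [List.dropWhile_cons_of_pos ha] at h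
      exact ih h
    · rw [List.dropWhile_cons_of_neg ha] at h
      cases h
      simpa using ha

def runsAux (rm : List String) (cur : List String) : List String → List (List String)
  | [] => if cur ≠ [] then [cur] else []
  | w :: ws =>
    if rm.contains w then (if cur ≠ [] then [cur] else []) ++ runsAux rm [] ws
    else runsAux rm (cur ++ [w]) ws

lemma winsA_nil (rm : List String) (n : Nat) (join1 : List String → String) (hn : 1 ≤ n) :
    winsA rm n join1 [] = [] := by
  simp [winsA, Nat.sub_eq_zero_of_le hn]

lemma segB_nil (n : Nat) (join1 : List String → String) (hn : 1 ≤ n) :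
    segB n join1 [] = [] := by
  simp [segB, Nat.sub_eq_zero_of_le hn]

lemma winsA_clean (rm : List String) (n : Nat) (join1 : List String → String) (hn : 1 ≤ n) :
    ∀ c : List String, (∀ w ∈ c, rm.contains w = false) →
      winsA rm n join1 c = segB n join1 c := by
  intro c
  induction c with
  | nil => intro _; rw [winsA_nil rm n join1 hn, segB_nil n join1 hn]
  | cons w c ih =>
    intro hc
    have hany : ((w :: c).take n).any (fun x => rm.contains x) = false := by
      simp only [List.any_eq_false]
      intro x hx
      simpa using hc x (List.mem_of_mem_take hx)
    rw [winsA_cons_of_clean rm n join1 w c hany, segB_cons,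
      ih (fun w hw => hc w (List.mem_cons_of_mem _ hw))]

lemma winsA_cross (rm : List String) (n : Nat) (join1 : List String → String) (hn : 1 ≤ n)
    (x : String) (hx : rm.contains x = true) (t : List String) :
    ∀ c : List String, (∀ w ∈ c, rm.contains w = false) →
      winsA rm n join1 (c ++ x :: t) = segB n join1 c ++ winsA rm n join1 t := by
  intro c
  induction c with
  | nil =>
    intro _
    obtain ⟨m, rfl⟩ : ∃ m, n = m + 1 := ⟨n - 1, by omega⟩
    have hx' : x ∈ rm := by simpa using hx
    simp only [List.nil_append]
    rw [winsA_cons_of_any rm (m+1) join1 x t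
      (by rw [List.take_succ_cons]; simp [hx']), segB_nil _ join1 hn]
    simp
  | cons w c ih =>
    intro hc
    have hclean : ∀ y ∈ c, rm.contains y = false := fun y hy => hc y (List.mem_cons_of_mem _ hy)
    have ihc := ih hclean
    by_cases hcase : n ≤ c.length + 1
    · have htk : ((w :: c) ++ x :: t).take n = (w :: c).take n :=
        List.take_append_of_le_length (by simpa using hcase)
      have hany : ((w :: (c ++ x :: t)).take n).any (fun y => rm.contains y) = false := by
        have : (w :: (c ++ x :: t)) = (w :: c) ++ x :: t := by simp
        rw [this, htk]
        simp only [List.any_eq_false]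
        intro y hy
        simpa using hc y (List.mem_of_mem_take hy)
      rw [show (w :: c) ++ x :: t = w :: (c ++ x :: t) by simp] at htk
      rw [List.cons_append]
      rw [winsA_cons_of_clean rm n join1 w (c ++ x :: t) hany, segB_cons, ihc]
      have hlen : n ≤ (c ++ x :: t).length + 1 := by simp; omega
      rw [if_pos hlen, if_pos hcase, htk]
      simp
    · have hmem : x ∈ (w :: (c ++ x :: t)).take n := by
        have hsplit : (w :: (c ++ x :: t)) = (w :: c) ++ x :: t := by simp
        rw [hsplit, List.take_append]
        refine List.mem_append_right _ ?_
        obtain ⟨m, hm⟩ : ∃ m, n - (w :: c).length = m + 1 := ⟨n - (w::c).length - 1, by simp; omega⟩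
        rw [hm, List.take_succ_cons]
        exact List.mem_cons_self
      have hany : ((w :: (c ++ x :: t)).take n).any (fun y => rm.contains y) = true :=
        List.any_eq_true.mpr ⟨x, hmem, hx⟩
      rw [List.cons_append]
      rw [winsA_cons_of_any rm n join1 w (c ++ x :: t) hany, segB_cons, ihc, if_neg hcase]
      have : segB n join1 c = [] := by
        have : c.length + 1 - n = 0 := by omega
        simp [segB, this]
      simp [this]

lemma runsAux_clean (rm : List String) :
    ∀ (c : List String), (∀ w ∈ c, rm.contains w = false) →
      ∀ (cur rest : List String), runsAux rm cur (c ++ rest) = runsAux rm (cur ++ c) rest := by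
  intro c
  induction c with
  | nil => intro _ cur rest; simp
  | cons w c ih =>
    intro hc cur rest
    have hw : rm.contains w = false := hc w List.mem_cons_self
    show runsAux rm cur (w :: (c ++ rest)) = _
    rw [runsAux, if_neg (by simpa using hw)]
    rw [ih (fun y hy => hc y (List.mem_cons_of_mem _ hy)) (cur ++ [w]) rest]
    simp

lemma main_decomp (rm : List String) (n : Nat) (join1 : List String → String) (hn : 1 ≤ n) :
    ∀ ws : List String, winsA rm n join1 ws = (runsAux rm [] ws).flatMap (segB n join1) := by
  intro ws
  induction hl : ws.length using Nat.strong_induction_on generalizing ws with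
  | _ k IH =>
  subst hl
  have hsplit := (List.takeWhile_append_dropWhile (p := fun w => !rm.contains w) (l := ws)).symm
  set c := ws.takeWhile (fun w => !rm.contains w) with hc
  have hclean : ∀ w ∈ c, rm.contains w = false := by
    intro w hw
    have := List.mem_takeWhile_imp hw
    simpa using this
  cases hd : ws.dropWhile (fun w => !rm.contains w) with
  | nil =>
    rw [hd] at hsplit
    simp only [List.append_nil] at hsplit
    rw [hsplit, winsA_clean rm n join1 hn c hclean,
      show c = c ++ [] by simp, runsAux_clean rm c hclean [] []]
    simp only [List.append_nil, List.nil_append]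
    rw [runsAux]
    by_cases hce : c = []
    · simp [hce, segB_nil n join1 hn]
    · simp [hce]
  | cons x t =>
    rw [hd] at hsplit
    have hx : rm.contains x = true := by
      have := dropWhile_head_false (fun w => !rm.contains w) x t ws hd
      simpa using this
    have hlt : t.length < ws.length := by
      rw [hsplit]; simp; omega
    rw [hsplit, winsA_cross rm n join1 hn x hx t c hclean,
      runsAux_clean rm c hclean [] (x :: t)]
    simp only [List.nil_append]
    rw [runsAux, if_pos hx, IH t.length (by rw [hsplit] at hlt ⊢; simpa using hlt) t rfl]
    rw [List.flatMap_append]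
    by_cases hce : c = []
    · simp [hce, segB_nil n join1 hn]
    · simp [hce]

lemma foldl_skip_if {α β : Type} (p : α → Bool) (f : α → β) :
    ∀ (l : List α) (acc : List β),
      l.foldl (fun acc x => if p x then acc else acc ++ [f x]) acc =
        acc ++ (l.filter (fun x => !p x)).map f := by
  intro l
  induction l with
  | nil => intro acc; simp
  | cons a l ih =>
    intro acc
    rw [List.foldl_cons, List.filter_cons]
    by_cases ha : p a = true
    · simp only [ha, if_true, Bool.not_true, Bool.false_eq_true, if_false]
      exact ih acc
    · simp only [Bool.not_eq_true] at ha
      simp only [ha, Bool.false_eq_true, if_false, Bool.not_false, if_true]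
      rw [ih (acc ++ [f a])]
      simp

lemma portA_eq (words : List String) (n : Nat) (deli : String) (rm : List String) :
    (PySem.List.pyRange 0 ((words.length : Int) - (n : Int) + 1) 1).foldl
      (fun ngrams i =>
        let block := PySem.List.slice words (some i) (some (i + (n : Int)))
        if block.any (fun w => PySem.Set.contains rm w) then ngrams
        else ngrams ++ [PySem.Str.join deli block]) [] =
    winsA rm n (fun b => PySem.Str.join deli b) words := by
  have hm : (((words.length : Int) - (n : Int) + 1) - 0).toNat = words.length + 1 - n := by
    omega
  rw [PySem.List.pyRange_one, hm, List.foldl_map]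
  have hfun : (fun (ngrams : List String) (k : Nat) =>
        let block := PySem.List.slice words (some ((0 : Int) + (k : Nat))) (some ((0 : Int) + (k : Nat) + (n : Int)))
        if block.any (fun w => PySem.Set.contains rm w) then ngrams
        else ngrams ++ [PySem.Str.join deli block]) =
      (fun ngrams k =>
        if ((words.drop k).take n).any (fun w => rm.contains w) then ngrams
        else ngrams ++ [PySem.Str.join deli ((words.drop k).take n)]) := by
    funext ngrams k
    simp only [zero_add, PySem.List.slice_natCast_add, PySem.Set.contains_eq_listContains]
  rw [hfun, foldl_skip_if]
  unfold winsA
  rw [List.filter_map, List.map_map]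
  simp [Function.comp_def]

lemma portB_runs (rm : List String) :
    ∀ (ws : List String) (rs : List (List String)) (cur : List String),
      (fun st : List (List String) × List String =>
        if st.2 ≠ [] then st.1 ++ [st.2] else st.1)
        (ws.foldl (fun (st : List (List String) × List String) w =>
          if PySem.Set.contains rm w then
            (if st.2 ≠ [] then st.1 ++ [st.2] else st.1, [])
          else (st.1, st.2 ++ [w])) (rs, cur)) =
      rs ++ runsAux rm cur ws := by
  intro ws
  induction ws with
  | nil =>
    intro rs cur
    rw [runsAux]
    by_cases hc : cur = [] <;> simp [hc]
  | cons w ws ih =>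
    intro rs cur
    by_cases hw : rm.contains w = true
    · have hw' : PySem.Set.contains rm w = true := by simpa using hw
      simp only [List.foldl_cons, hw', if_true, runsAux, hw]
      by_cases hc : cur = []
      · have h0 := ih rs []
        simp at h0
        simp [hc]
        exact h0
      · have h0 := ih (rs ++ [cur]) []
        simp at h0
        simp [hc]
        rw [h0]
    · have hw' : PySem.Set.contains rm w = false := by simpa using hw
      simp only [List.foldl_cons, hw', Bool.false_eq_true, if_false, runsAux, hw]
      exact ih rs (cur ++ [w])

lemma portB_inner (r : List String) (n : Nat) (deli : String) (acc : List String) :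
    (PySem.List.pyRange 0 ((r.length : Int) - (n : Int) + 1) 1).foldl
      (fun ngrams i =>
        ngrams ++ [PySem.Str.join deli (PySem.List.slice r (some i) (some (i + (n : Int))))])
      acc = acc ++ segB n (fun b => PySem.Str.join deli b) r := by
  have hm : (((r.length : Int) - (n : Int) + 1) - 0).toNat = r.length + 1 - n := by omega
  rw [PySem.List.pyRange_one, hm, List.foldl_map, PySem.List.foldl_append_singleton_eq_map]
  unfold segB
  congr 1
  apply List.map_congr_left
  intro k _
  simp only [zero_add, PySem.List.slice_natCast_add]

lemma portB_outer (runs : List (List String)) (n : Nat) (deli : String) :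
    runs.foldl
      (fun ngrams run =>
        (PySem.List.pyRange 0 ((run.length : Int) - (n : Int) + 1) 1).foldl
          (fun ngrams i =>
            ngrams ++ [PySem.Str.join deli (PySem.List.slice run (some i) (some (i + (n : Int))))])
          ngrams) [] =
    runs.flatMap (segB n (fun b => PySem.Str.join deli b)) := by
  have hfun : (fun (ngrams : List String) (run : List String) =>
        (PySem.List.pyRange 0 ((run.length : Int) - (n : Int) + 1) 1).foldl
          (fun ngrams i =>
            ngrams ++ [PySem.Str.join deli (PySem.List.slice run (some i) (some (i + (n : Int))))])
          ngrams) =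
      (fun ngrams run => ngrams ++ segB n (fun b => PySem.Str.join deli b) run) := by
    funext ngrams run
    exact portB_inner run n deli ngrams
  rw [hfun, PySem.List.foldl_append_eq_flatMap]
  simp

theorem generateNgram_spec : Claim_equal_generateNgram := by
  intro paper ngram deli rmSet _ hpre
  obtain ⟨hn1, _⟩ := hpre
  unfold Spec_generateNgram generateNgram generateNgram_alt
  by_cases hw : ((PySem.Str.split₀ paper).length == 1) = true
  · simp only [hw, if_true]
  · simp only [hw, Bool.false_eq_true, if_false]
    have hng : ngram = ((ngram.toNat : Nat) : Int) := (Int.toNat_of_nonneg (by omega)).symm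
    rw [hng]
    rw [portA_eq (PySem.Str.split₀ paper) ngram.toNat deli rmSet]
    rw [portB_outer]
    have hruns := portB_runs rmSet (PySem.Str.split₀ paper) [] []
    simp only [ne_eq] at hruns ⊢
    rw [hruns, List.nil_append]
    exact main_decomp rmSet ngram.toNat (fun b => PySem.Str.join deli b) (by omega)
      (PySem.Str.split₀ paper)
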